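-- pv_equiv track=rewrite | github.com/williamcommu/specifinput | core/config_manager.py | convert_keybind_format
-- ===== SOURCE A (Python) =====
-- def convert_keybind_format(keybind: str) -> str:
--     """Convert user-friendly keybind format to Tkinter format"""
--     if "+" not in keybind:
--         return keybind
--
--     parts = keybind.split("+")
--     tkinter_parts = []
--
--     # Sort modifiers for consistent ordering (Tkinter is sensitive to order)
--     modifier_order = {"Control": 0, "Alt": 1, "Shift": 2, "Command": 3}
--     modifiers = []
--
--     for part in parts[:-1]:  # All but the last part are modifiers
--         part = part.strip()
--         if part.lower() == "ctrl":
--             modifiers.append(("Control", 0))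
--         elif part.lower() == "alt":
--             modifiers.append(("Alt", 1))
--         elif part.lower() == "shift":
--             modifiers.append(("Shift", 2))
--         elif part.lower() == "cmd":
--             modifiers.append(("Command", 3))
--         else:
--             modifiers.append((part.capitalize(), 4))
--
--     # Sort modifiers by their order priority
--     modifiers.sort(key=lambda x: x[1])
--     tkinter_parts = [mod[0] for mod in modifiers]
--
--     # Add the actual key
--     key = parts[-1].strip()
--     tkinter_parts.append(key)
--
--     return "-".join(tkinter_parts)
-- ===== SOURCE B (Python) =====
-- CANON = {"ctrl": ("Control", 0), "alt": ("Alt", 1),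
--          "shift": ("Shift", 2), "cmd": ("Command", 3)}
--
-- def convert_keybind_format(keybind: str) -> str:
--     """Convert user-friendly keybind format to Tkinter format"""
--     if "+" not in keybind:
--         return keybind
--     parts = keybind.split("+")
--     mapped = []
--     for p in parts[:-1]:
--         q = p.strip()
--         mapped.append(CANON.get(q.lower(), (q.capitalize(), 4)))
--     # stable priority ordering by bucket scans instead of sorting
--     ordered = [name for pr in range(5) for (name, q) in mapped if q == pr]
--     ordered.append(parts[-1].strip())
--     return "-".join(ordered)
-- ===== Notes on version B (the rewrite author's own statement) =====
-- stated objective: alternative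
-- what changed: Replaces the comparison sort of (modifier, priority) pairs with five priority-bucket scans of the mapped list in original order, and the if/elif chain with a canonical lookup table; the guard and the final join are unchanged.
import Mathlib
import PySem

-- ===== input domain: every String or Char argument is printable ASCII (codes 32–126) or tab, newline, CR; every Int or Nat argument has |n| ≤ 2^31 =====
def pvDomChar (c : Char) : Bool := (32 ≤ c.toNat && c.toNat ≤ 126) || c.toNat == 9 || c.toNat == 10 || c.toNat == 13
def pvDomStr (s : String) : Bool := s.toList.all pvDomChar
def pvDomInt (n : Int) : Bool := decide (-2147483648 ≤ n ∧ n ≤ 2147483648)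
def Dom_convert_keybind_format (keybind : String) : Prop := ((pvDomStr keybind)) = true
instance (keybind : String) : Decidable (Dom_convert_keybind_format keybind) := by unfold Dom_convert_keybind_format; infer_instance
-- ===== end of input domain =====

-- B replaces A's stable comparison sort of (modifier, priority) pairs by five in-order
-- priority-bucket scans, and A's if/elif chain by a canonical lookup table (alternative decomposition).

-- shared helper: Python str.capitalize, ported by hand (exact on the ASCII domain:
-- first char uppercased, the rest lowercased)
def pvCapitalize (s : String) : String :=
  String.ofList (match s.toList with
    | [] => []
    | c :: t => PySem.Chars.upperChar c :: t.map PySem.Chars.lowerChar)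

-- ===== PORT A =====
def convert_keybind_format (keybind : String) : String :=
  if PySem.Str.isIn "+" keybind = false then keybind
  else
    let parts := (PySem.Str.split? keybind "+").getD []
    let modifiers := (PySem.List.slice parts none (some (-1))).map (fun part =>
      let part := PySem.Str.strip part
      if PySem.Str.lower part = "ctrl" then ("Control", (0 : Int))
      else if PySem.Str.lower part = "alt" then ("Alt", 1)
      else if PySem.Str.lower part = "shift" then ("Shift", 2)
      else if PySem.Str.lower part = "cmd" then ("Command", 3)
      else (pvCapitalize part, 4))
    let modifiers := PySem.List.sorted modifiers (fun x => x.2) false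
    let tkinter_parts := modifiers.map (fun m => m.1)
    let key := PySem.Str.strip ((PySem.List.pyGet? parts (-1)).getD "")
    PySem.Str.join "-" (tkinter_parts ++ [key])

-- ===== PORT B =====
def pvCanon : PySem.Dict String (String × Int) :=
  PySem.Dict.ofList [("ctrl", ("Control", 0)), ("alt", ("Alt", 1)),
                     ("shift", ("Shift", 2)), ("cmd", ("Command", 3))]

def convert_keybind_format_alt (keybind : String) : String :=
  if PySem.Str.isIn "+" keybind = false then keybind
  else
    let parts := (PySem.Str.split? keybind "+").getD []
    let mapped := (PySem.List.slice parts none (some (-1))).map (fun p =>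
      let q := PySem.Str.strip p
      pvCanon.getD (PySem.Str.lower q) (pvCapitalize q, 4))
    let ordered := (PySem.List.pyRange 0 5 1).flatMap (fun pr =>
      mapped.filterMap (fun m => if m.2 == pr then some m.1 else none))
    PySem.Str.join "-" (ordered ++ [PySem.Str.strip ((PySem.List.pyGet? parts (-1)).getD "")])

-- ===== PRECONDITION & SPEC =====
def Spec_convert_keybind_format (keybind : String) (out : String) : Prop := out = convert_keybind_format_alt keybind
instance (keybind : String) (out : String) : Decidable (Spec_convert_keybind_format keybind out) := by unfold Spec_convert_keybind_format; infer_instance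

-- ===== CLAIM (what is proved, stated in full; the proofs are below) =====
def Claim_equal_convert_keybind_format : Prop := ∀ (keybind : String), Dom_convert_keybind_format keybind → Spec_convert_keybind_format keybind (convert_keybind_format keybind)

-- ===== LEMMAS AND PROOFS =====

-- B's table lookup agrees with A's if/elif chain, pointwise
theorem pv_canon_getD (q : String) :
    pvCanon.getD (PySem.Str.lower q) (pvCapitalize q, 4) =
    (if PySem.Str.lower q = "ctrl" then ("Control", (0 : Int))
     else if PySem.Str.lower q = "alt" then ("Alt", 1)
     else if PySem.Str.lower q = "shift" then ("Shift", 2)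
     else if PySem.Str.lower q = "cmd" then ("Command", 3)
     else (pvCapitalize q, 4)) := by
  have h : pvCanon = ⟨[("ctrl", ("Control", 0)), ("alt", ("Alt", 1)),
                      ("shift", ("Shift", 2)), ("cmd", ("Command", 3))]⟩ := by decide
  by_cases h1 : PySem.Str.lower q = "ctrl"
  · rw [if_pos h1, h1]; rfl
  by_cases h2 : PySem.Str.lower q = "alt"
  · rw [if_neg h1, if_pos h2, h2]; rfl
  by_cases h3 : PySem.Str.lower q = "shift"
  · rw [if_neg h1, if_neg h2, if_pos h3, h3]; rfl
  by_cases h4 : PySem.Str.lower q = "cmd"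
  · rw [if_neg h1, if_neg h2, if_neg h3, if_pos h4, h4]; rfl
  · rw [if_neg h1, if_neg h2, if_neg h3, if_neg h4, PySem.Dict.getD_of_not_contains]
    rw [h]
    simp [PySem.Dict.contains_mk]
    exact ⟨fun e => h1 e.symm, fun e => h2 e.symm, fun e => h3 e.symm, fun e => h4 e.symm⟩

theorem pv_insertBy_append_not {α : Type} (before : α → α → Bool) (x : α)
    (A B : List α) (hA : ∀ a ∈ A, before x a = false) :
    PySem.List.insertBy before x (A ++ B) = A ++ PySem.List.insertBy before x B := by
  induction A with
  | nil => simp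
  | cons a A ih =>
    simp only [List.cons_append, PySem.List.insertBy, hA a (by simp)]
    simp [ih (fun a ha => hA a (by simp [ha]))]

theorem pv_insertBy_eq_cons {α : Type} (before : α → α → Bool) (x : α)
    (B : List α) (hB : ∀ b ∈ B, before x b = true) :
    PySem.List.insertBy before x B = x :: B := by
  cases B with
  | nil => rfl
  | cons b B => simp [PySem.List.insertBy, hB b (by simp)]

-- the stable sort by a {0,…,4}-valued key is the concatenation of the five priority buckets
theorem pv_sorted_eq_buckets {α : Type} (l : List (α × Int))
    (h : ∀ x ∈ l, 0 ≤ x.2 ∧ x.2 < 5) :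
    PySem.List.sorted l (fun x => x.2) false =
    (PySem.List.pyRange 0 5 1).flatMap (fun pr => l.filter (fun m => m.2 == pr)) := by
  have hr : PySem.List.pyRange 0 5 1 = [0, 1, 2, 3, 4] := by decide
  rw [hr, PySem.List.sorted_eq_foldl_insertBy]
  induction l using List.reverseRecOn with
  | nil => simp
  | append_singleton l x ih =>
    have hx := h x (by simp)
    have hl : ∀ y ∈ l, 0 ≤ y.2 ∧ y.2 < 5 := fun y hy => h y (by simp [hy])
    rw [List.foldl_append, List.foldl_cons, List.foldl_nil, ih hl]
    simp only [List.flatMap_cons, List.flatMap_nil, List.filter_append, List.append_nil]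
    have hone : ∀ (pr : Int), List.filter (fun m : α × Int => m.2 == pr) [x] =
        if x.2 = pr then [x] else [] := by
      intro pr; by_cases hpr : x.2 = pr <;> simp [hpr]
    have hmem : ∀ (pr : Int) (m : α × Int),
        m ∈ List.filter (fun m : α × Int => m.2 == pr) l → m.2 = pr := by
      intro pr m hm; simpa using List.of_mem_filter hm
    have hval : x.2 = 0 ∨ x.2 = 1 ∨ x.2 = 2 ∨ x.2 = 3 ∨ x.2 = 4 := by omega
    simp only [hone]
    rcases hval with h0 | h0 | h0 | h0 | h0 <;> simp only [h0] <;> norm_num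
    · rw [pv_insertBy_append_not _ x _ _ (fun a ha => by simp [hmem 0 a ha, h0]),
          pv_insertBy_eq_cons _ x _ (by
            simp only [List.mem_append]
            rintro b (hb | hb | hb | hb) <;> simp [hmem _ b hb, h0])]
    · rw [pv_insertBy_append_not _ x _ _ (fun a ha => by simp [hmem 0 a ha, h0]),
          pv_insertBy_append_not _ x _ _ (fun a ha => by simp [hmem 1 a ha, h0]),
          pv_insertBy_eq_cons _ x _ (by
            simp only [List.mem_append]
            rintro b (hb | hb | hb) <;> simp [hmem _ b hb, h0])]
    · rw [pv_insertBy_append_not _ x _ _ (fun a ha => by simp [hmem 0 a ha, h0]),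
          pv_insertBy_append_not _ x _ _ (fun a ha => by simp [hmem 1 a ha, h0]),
          pv_insertBy_append_not _ x _ _ (fun a ha => by simp [hmem 2 a ha, h0]),
          pv_insertBy_eq_cons _ x _ (by
            simp only [List.mem_append]
            rintro b (hb | hb) <;> simp [hmem _ b hb, h0])]
    · rw [pv_insertBy_append_not _ x _ _ (fun a ha => by simp [hmem 0 a ha, h0]),
          pv_insertBy_append_not _ x _ _ (fun a ha => by simp [hmem 1 a ha, h0]),
          pv_insertBy_append_not _ x _ _ (fun a ha => by simp [hmem 2 a ha, h0]),
          pv_insertBy_append_not _ x _ _ (fun a ha => by simp [hmem 3 a ha, h0]),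
          pv_insertBy_eq_cons _ x _ (fun b hb => by simp [hmem 4 b hb, h0])]
    · rw [PySem.List.insertBy_of_forall_not_before _ x _ (by
            simp only [List.mem_append]
            rintro b (hb | hb | hb | hb | hb) <;> simp [hmem _ b hb, h0])]
      simp

-- filterMap of a guarded projection is map-of-filter
theorem pv_filterMap_eq_map_filter {α : Type} (l : List (α × Int)) (pr : Int) :
    l.filterMap (fun m => if m.2 == pr then some m.1 else none) =
    (l.filter (fun m => m.2 == pr)).map (fun m => m.1) := by
  induction l with
  | nil => rfl
  | cons a l ih =>
    cases h : (a.2 == pr) <;>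
      · simp only [List.filterMap_cons, List.filter_cons, h]
        simpa using ih

-- projecting names out of the sorted pair list = B's bucketed comprehension
theorem pv_sorted_map {α : Type} (L : List (α × Int))
    (h : ∀ x ∈ L, 0 ≤ x.2 ∧ x.2 < 5) :
    (PySem.List.sorted L (fun x => x.2) false).map (fun m => m.1) =
    (PySem.List.pyRange 0 5 1).flatMap (fun pr =>
      L.filterMap (fun m => if m.2 == pr then some m.1 else none)) := by
  rw [pv_sorted_eq_buckets L h, List.map_flatMap]
  exact List.flatMap_congr (fun pr _ => (pv_filterMap_eq_map_filter L pr).symm)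

-- ===== VERDICT (by name: the statement is the Claim_ definition above) =====
theorem convert_keybind_format_spec : Claim_equal_convert_keybind_format := by
  intro keybind _
  unfold Spec_convert_keybind_format convert_keybind_format convert_keybind_format_alt
  by_cases hin : PySem.Str.isIn "+" keybind = false
  · rw [if_pos hin, if_pos hin]
  · rw [if_neg hin, if_neg hin]
    have hfun : (fun p =>
        let q := PySem.Str.strip p
        pvCanon.getD (PySem.Str.lower q) (pvCapitalize q, 4)) =
        (fun part =>
          let part := PySem.Str.strip part
          if PySem.Str.lower part = "ctrl" then ("Control", (0 : Int))
          else if PySem.Str.lower part = "alt" then ("Alt", 1)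
          else if PySem.Str.lower part = "shift" then ("Shift", 2)
          else if PySem.Str.lower part = "cmd" then ("Command", 3)
          else (pvCapitalize part, 4)) :=
      funext fun p => pv_canon_getD (PySem.Str.strip p)
    refine congrArg (fun t => PySem.Str.join "-"
      (t ++ [PySem.Str.strip ((PySem.List.pyGet?
        ((PySem.Str.split? keybind "+").getD []) (-1)).getD "")])) ?_
    rw [hfun]
    apply pv_sorted_map
    intro x hx
    rcases List.mem_map.1 hx with ⟨p, _, rfl⟩
    dsimp only
    split_ifs <;> simp
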